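-- pv_equiv track=rewrite | github.com/eddiethedean/ryact | scripts/apply_parity_burndown_inventory.py | _patch_wave_burndown_v50_react_manifest_slices
-- ===== SOURCE A (Python) =====
-- _BURNDOWN_V50_REACT_MANIFEST_SLICES: tuple[tuple[str, str, str], ...] = (
--     (
--         "react.ReactClassComponentPropResolution-test.reactclasscomponentpropresolution."
--         "resolves_ref_and_default_props_before_calling_lifecycle_methods",
--         "react.classComponent.propResolutionLifecycle",
--         "tests_upstream/react/test_class_component_prop_resolution.py",
--     ),
--     (
--         "react.ReactClassSetStateCallback-test.reactclasssetstatecallback."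
--         "regression_setstate_callback_2nd_arg_should_only_fire_once_even_after_a_rebase",
--         "react.classComponent.setStateCallbackRebaseOnce",
--         "tests_upstream/react/test_class_setstate_callback_once.py",
--     ),
--     (
--         "react.ReactTopLevelText-test.reacttopleveltext."
--         "should_render_a_component_returning_bigints_directly_from_render",
--         "react.topLevelText.primitiveReturns",
--         "tests_upstream/react/test_react_top_level_text_primitives.py",
--     ),
--     (
--         "react.ReactTopLevelText-test.reacttopleveltext."
--         "should_render_a_component_returning_numbers_directly_from_render",
--         "react.topLevelText.primitiveReturns",
--         "tests_upstream/react/test_react_top_level_text_primitives.py",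
--     ),
--     (
--         "react.ReactTopLevelText-test.reacttopleveltext."
--         "should_render_a_component_returning_strings_directly_from_render",
--         "react.topLevelText.primitiveReturns",
--         "tests_upstream/react/test_react_top_level_text_primitives.py",
--     ),
-- )
--
-- def _patch_wave_burndown_v50_react_manifest_slices(cases: list[dict]) -> int:
--     changed = 0
--     for row_id, manifest_id, py_test in _BURNDOWN_V50_REACT_MANIFEST_SLICES:
--         for c in cases:
--             if c.get("id") != row_id or c.get("status") != "pending":
--                 continue
--             c["status"] = "implemented"
--             c["manifest_id"] = manifest_id
--             c["python_test"] = py_test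
--             c["non_goal_rationale"] = None
--             changed += 1
--             break
--     return changed
-- ===== SOURCE B (Python) =====
-- _BURNDOWN_V50_REACT_MANIFEST_SLICES: tuple[tuple[str, str, str], ...] = (
--     (
--         "react.ReactClassComponentPropResolution-test.reactclasscomponentpropresolution."
--         "resolves_ref_and_default_props_before_calling_lifecycle_methods",
--         "react.classComponent.propResolutionLifecycle",
--         "tests_upstream/react/test_class_component_prop_resolution.py",
--     ),
--     (
--         "react.ReactClassSetStateCallback-test.reactclasssetstatecallback."
--         "regression_setstate_callback_2nd_arg_should_only_fire_once_even_after_a_rebase",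
--         "react.classComponent.setStateCallbackRebaseOnce",
--         "tests_upstream/react/test_class_setstate_callback_once.py",
--     ),
--     (
--         "react.ReactTopLevelText-test.reacttopleveltext."
--         "should_render_a_component_returning_bigints_directly_from_render",
--         "react.topLevelText.primitiveReturns",
--         "tests_upstream/react/test_react_top_level_text_primitives.py",
--     ),
--     (
--         "react.ReactTopLevelText-test.reacttopleveltext."
--         "should_render_a_component_returning_numbers_directly_from_render",
--         "react.topLevelText.primitiveReturns",
--         "tests_upstream/react/test_react_top_level_text_primitives.py",
--     ),
--     (
--         "react.ReactTopLevelText-test.reacttopleveltext."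
--         "should_render_a_component_returning_strings_directly_from_render",
--         "react.topLevelText.primitiveReturns",
--         "tests_upstream/react/test_react_top_level_text_primitives.py",
--     ),
-- )
--
--
-- def _patch_wave_burndown_v50_react_manifest_slices(cases: list[dict]) -> int:
--     # Pass 1: index the FIRST pending case per id (preserves A's first-match semantics).
--     first_pending: dict[str, dict] = {}
--     for c in cases:
--         if c.get("status") == "pending":
--             cid = c.get("id")
--             if cid is not None and cid not in first_pending:
--                 first_pending[cid] = c
--     # Pass 2: one dict lookup per manifest row.
--     changed = 0
--     for row_id, manifest_id, py_test in _BURNDOWN_V50_REACT_MANIFEST_SLICES: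
--         c = first_pending.get(row_id)
--         if c is not None:
--             c["status"] = "implemented"
--             c["manifest_id"] = manifest_id
--             c["python_test"] = py_test
--             c["non_goal_rationale"] = None
--             changed += 1
--     return changed
-- ===== Notes on version B (the rewrite author's own statement) =====
-- stated objective: alternative
-- what changed: A rescans the whole cases list for each of the 5 manifest rows with a first-match break; B builds a first-pending-case-per-id index in one pass over cases and then does one dict lookup per manifest row.
import Mathlib
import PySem

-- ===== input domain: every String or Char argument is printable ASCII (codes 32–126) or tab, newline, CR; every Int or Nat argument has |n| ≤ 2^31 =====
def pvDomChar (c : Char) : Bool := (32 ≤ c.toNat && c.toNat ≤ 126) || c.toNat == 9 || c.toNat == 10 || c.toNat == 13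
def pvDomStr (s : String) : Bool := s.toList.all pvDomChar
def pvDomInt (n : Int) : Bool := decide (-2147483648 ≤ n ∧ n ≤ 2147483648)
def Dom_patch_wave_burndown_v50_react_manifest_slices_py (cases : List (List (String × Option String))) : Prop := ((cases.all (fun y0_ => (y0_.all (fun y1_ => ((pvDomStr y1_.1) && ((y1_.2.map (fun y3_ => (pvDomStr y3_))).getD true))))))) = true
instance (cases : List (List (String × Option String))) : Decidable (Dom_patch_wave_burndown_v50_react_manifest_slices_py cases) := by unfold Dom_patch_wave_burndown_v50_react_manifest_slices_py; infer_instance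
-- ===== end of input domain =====

-- B replaces A's five rescans of `cases` by one indexing pass (first pending case per id)
-- plus one dict lookup per manifest row. Both A and B mutate the matched case dicts in place;
-- the equivalence proved here is about the RETURN value (the count) only.

-- ===== PORT A =====

-- the module constant _BURNDOWN_V50_REACT_MANIFEST_SLICES
def pvRows : List (String × String × String) :=
  [("react.ReactClassComponentPropResolution-test.reactclasscomponentpropresolution.resolves_ref_and_default_props_before_calling_lifecycle_methods",
    "react.classComponent.propResolutionLifecycle",
    "tests_upstream/react/test_class_component_prop_resolution.py"),
   ("react.ReactClassSetStateCallback-test.reactclasssetstatecallback.regression_setstate_callback_2nd_arg_should_only_fire_once_even_after_a_rebase",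
    "react.classComponent.setStateCallbackRebaseOnce",
    "tests_upstream/react/test_class_setstate_callback_once.py"),
   ("react.ReactTopLevelText-test.reacttopleveltext.should_render_a_component_returning_bigints_directly_from_render",
    "react.topLevelText.primitiveReturns",
    "tests_upstream/react/test_react_top_level_text_primitives.py"),
   ("react.ReactTopLevelText-test.reacttopleveltext.should_render_a_component_returning_numbers_directly_from_render",
    "react.topLevelText.primitiveReturns",
    "tests_upstream/react/test_react_top_level_text_primitives.py"),
   ("react.ReactTopLevelText-test.reacttopleveltext.should_render_a_component_returning_strings_directly_from_render",
    "react.topLevelText.primitiveReturns",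
    "tests_upstream/react/test_react_top_level_text_primitives.py")]

-- c.get(k)  (value None and missing key both give None)
def pvGet (c : PySem.Dict String (Option String)) (k : String) : Option String :=
  (PySem.Dict.get? c k).getD none

-- the four in-place field assignments on the matched case
def pvPatch (c : PySem.Dict String (Option String)) (m t : String) : PySem.Dict String (Option String) :=
  (((c.insert "status" (some "implemented")).insert "manifest_id" (some m)).insert
      "python_test" (some t)).insert "non_goal_rationale" none

-- A's inner 'for c in cases: … break' loop: first matching case patched, flag = a break happened
def pvScanPatch (rid m t : String) :
    List (PySem.Dict String (Option String)) →
      List (PySem.Dict String (Option String)) × Bool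
  | [] => ([], false)
  | c :: rest =>
    if !(pvGet c "id" == some rid) || !(pvGet c "status" == some "pending") then
      let r := pvScanPatch rid m t rest
      (c :: r.1, r.2)
    else
      (pvPatch c m t :: rest, true)

def patch_wave_burndown_v50_react_manifest_slices_py (cases : List (List (String × Option String))) : Int :=
  let cs := cases.map PySem.Dict.ofList
  (pvRows.foldl
    (fun (st : Int × List (PySem.Dict String (Option String))) r =>
      let p := pvScanPatch r.1 r.2.1 r.2.2 st.2
      (st.1 + (if p.2 then 1 else 0), p.1))
    (0, cs)).1

-- ===== PORT B =====

-- pass 1: first_pending — first pending case per id (insert only when the id is new)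
def pvIndexFrom (d : PySem.Dict String (PySem.Dict String (Option String)))
    (cs : List (PySem.Dict String (Option String))) :
    PySem.Dict String (PySem.Dict String (Option String)) :=
  cs.foldl
    (fun d c =>
      if pvGet c "status" == some "pending" then
        match pvGet c "id" with
        | some cid => if d.contains cid then d else d.insert cid c
        | none => d
      else d)
    d

-- pass 2: one lookup per manifest row (Source B also sets the four fields on the found case,
-- a mutation of the shared case object that cannot affect the returned count)
def patch_wave_burndown_v50_react_manifest_slices_py_alt (cases : List (List (String × Option String))) : Int :=
  let idx := pvIndexFrom PySem.Dict.empty (cases.map PySem.Dict.ofList)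
  pvRows.foldl
    (fun changed r => changed + (if (idx.get? r.1).isSome then 1 else 0)) 0

-- ===== PRECONDITION & SPEC =====
def Spec_patch_wave_burndown_v50_react_manifest_slices_py (cases : List (List (String × Option String))) (out : Int) : Prop := out = patch_wave_burndown_v50_react_manifest_slices_py_alt cases
instance (cases : List (List (String × Option String))) (out : Int) : Decidable (Spec_patch_wave_burndown_v50_react_manifest_slices_py cases out) := by unfold Spec_patch_wave_burndown_v50_react_manifest_slices_py; infer_instance

-- ===== CLAIM (what is proved, stated in full; the proofs are below) =====
def Claim_equal_patch_wave_burndown_v50_react_manifest_slices_py : Prop := ∀ (cases : List (List (String × Option String))), Dom_patch_wave_burndown_v50_react_manifest_slices_py cases → Spec_patch_wave_burndown_v50_react_manifest_slices_py cases (patch_wave_burndown_v50_react_manifest_slices_py cases)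

-- ===== LEMMAS AND PROOFS =====

-- "there is a pending case with id rid"
def pvHas (rid : String) (cs : List (PySem.Dict String (Option String))) : Bool :=
  cs.any (fun c => pvGet c "id" == some rid && pvGet c "status" == some "pending")

lemma pvGet_patch_id (c : PySem.Dict String (Option String)) (m t : String) :
    pvGet (pvPatch c m t) "id" = pvGet c "id" := by
  simp [pvGet, pvPatch, PySem.Dict.get?_insert_of_ne _ _ (by decide : "id" ≠ "non_goal_rationale"),
    PySem.Dict.get?_insert_of_ne _ _ (by decide : "id" ≠ "python_test"),
    PySem.Dict.get?_insert_of_ne _ _ (by decide : "id" ≠ "manifest_id"),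
    PySem.Dict.get?_insert_of_ne _ _ (by decide : "id" ≠ "status")]

lemma pvScanPatch_flag (rid m t : String) (cs : List (PySem.Dict String (Option String))) :
    (pvScanPatch rid m t cs).2 = pvHas rid cs := by
  induction cs with
  | nil => rfl
  | cons c rest ih =>
    simp only [pvScanPatch, pvHas, List.any_cons]
    by_cases h : (!(pvGet c "id" == some rid) || !(pvGet c "status" == some "pending")) = true
    · have hf : (pvGet c "id" == some rid && pvGet c "status" == some "pending") = false := by
        revert h
        cases (pvGet c "id" == some rid) <;> cases (pvGet c "status" == some "pending") <;> simp
      rw [if_pos h]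
      simp only [pvHas] at ih
      simp [hf, ih]
    · have ht : (pvGet c "id" == some rid && pvGet c "status" == some "pending") = true := by
        revert h
        cases (pvGet c "id" == some rid) <;> cases (pvGet c "status" == some "pending") <;> simp
      rw [if_neg h]
      simp [ht]

lemma pvScanPatch_preserve (rid m t rid' : String) (hne : rid' ≠ rid)
    (cs : List (PySem.Dict String (Option String))) :
    pvHas rid' (pvScanPatch rid m t cs).1 = pvHas rid' cs := by
  induction cs with
  | nil => rfl
  | cons c rest ih =>
    simp only [pvScanPatch, pvHas, List.any_cons]
    by_cases h : (!(pvGet c "id" == some rid) || !(pvGet c "status" == some "pending")) = true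
    · rw [if_pos h]
      simp only [pvHas] at ih
      simp only [List.any_cons, ih]
    · have hidt : (pvGet c "id" == some rid) = true := by
        revert h
        cases (pvGet c "id" == some rid) <;> simp
      have hid : pvGet c "id" = some rid := by simpa using hidt
      have h1 : (pvGet (pvPatch c m t) "id" == some rid') = false := by
        rw [pvGet_patch_id, hid]
        simp [Ne.symm hne]
      have h2 : (pvGet c "id" == some rid') = false := by
        rw [hid]
        simp [Ne.symm hne]
      rw [if_neg h]
      simp [h1, h2]

lemma pvIndexFrom_isSome (rid : String)
    (d : PySem.Dict String (PySem.Dict String (Option String)))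
    (cs : List (PySem.Dict String (Option String))) :
    ((pvIndexFrom d cs).get? rid).isSome = (((d.get? rid).isSome) || pvHas rid cs) := by
  induction cs generalizing d with
  | nil => simp [pvIndexFrom, pvHas]
  | cons c rest ih =>
    have step : pvIndexFrom d (c :: rest) =
        pvIndexFrom (if pvGet c "status" == some "pending" then
          (match pvGet c "id" with
           | some cid => if d.contains cid then d else d.insert cid c
           | none => d) else d) rest := by
      simp [pvIndexFrom]
    rw [step, ih]
    by_cases hs : (pvGet c "status" == some "pending") = true
    · cases hid : pvGet c "id" with
      | none => simp [hs, hid, pvHas]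
      | some cid =>
        by_cases he : rid = cid
        · subst he
          by_cases hc : d.contains rid = true
          · have hsome : (d.get? rid).isSome = true := by
              rw [← PySem.Dict.contains_eq_isSome_get?]; exact hc
            simp [hs, hid, hc, hsome, pvHas]
          · have hg : (d.insert rid c).get? rid = some c := by simp
            simp [hs, hid, hc, hg, pvHas]
        · have hne : (cid == rid) = false := by simp [Ne.symm he]
          by_cases hc : d.contains cid = true
          · simp [hs, hid, hc, pvHas, hne]
          · have hg : (d.insert cid c).get? rid = d.get? rid := by
              rw [PySem.Dict.get?_insert_of_ne _ _ he]
            simp [hs, hid, hc, hg, pvHas, hne]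
    · have hsf : (pvGet c "status" == some "pending") = false := by
        revert hs; cases (pvGet c "status" == some "pending") <;> simp
      simp [hsf, pvHas]

-- the fold of A over any rows with pairwise-distinct ids counts pvHas on the INITIAL cases
lemma pvFoldA (rows : List (String × String × String))
    (hnd : rows.Pairwise (fun a b => a.1 ≠ b.1))
    (acc : Int) (cs : List (PySem.Dict String (Option String))) :
    (rows.foldl
      (fun (st : Int × List (PySem.Dict String (Option String))) r =>
        let p := pvScanPatch r.1 r.2.1 r.2.2 st.2
        (st.1 + (if p.2 then 1 else 0), p.1))
      (acc, cs)).1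
    = acc + (rows.map (fun r => if pvHas r.1 cs then (1 : Int) else 0)).sum := by
  induction rows generalizing acc cs with
  | nil => simp
  | cons r rest ih =>
    rcases List.pairwise_cons.mp hnd with ⟨hr, hrest⟩
    have hpres : ∀ r' ∈ rest, pvHas r'.1 (pvScanPatch r.1 r.2.1 r.2.2 cs).1 = pvHas r'.1 cs := by
      intro r' hmem
      exact pvScanPatch_preserve _ _ _ _ (Ne.symm (hr r' hmem)) cs
    simp only [List.foldl_cons]
    rw [ih hrest]
    have hmapeq : (rest.map (fun r' => if pvHas r'.1 (pvScanPatch r.1 r.2.1 r.2.2 cs).1 then (1 : Int) else 0))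
        = rest.map (fun r' => if pvHas r'.1 cs then (1 : Int) else 0) := by
      apply List.map_congr_left
      intro r' hmem
      rw [hpres r' hmem]
    simp only [List.map_cons, List.sum_cons, pvScanPatch_flag, hmapeq]
    ring

set_option maxRecDepth 8192 in
lemma pvRows_nodup : pvRows.Pairwise (fun a b => a.1 ≠ b.1) := by decide

-- ===== VERDICT (by name: the statement is the Claim_ definition above) =====
theorem patch_wave_burndown_v50_react_manifest_slices_py_spec : Claim_equal_patch_wave_burndown_v50_react_manifest_slices_py := by
  intro cases _
  show patch_wave_burndown_v50_react_manifest_slices_py cases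
      = patch_wave_burndown_v50_react_manifest_slices_py_alt cases
  unfold patch_wave_burndown_v50_react_manifest_slices_py
    patch_wave_burndown_v50_react_manifest_slices_py_alt
  rw [pvFoldA pvRows pvRows_nodup 0 (cases.map PySem.Dict.ofList)]
  have hB : ∀ (rows : List (String × String × String)) (acc : Int),
      rows.foldl (fun changed r => changed +
        (if ((pvIndexFrom PySem.Dict.empty (cases.map PySem.Dict.ofList)).get? r.1).isSome then (1:Int) else 0)) acc
      = acc + (rows.map (fun r => if pvHas r.1 (cases.map PySem.Dict.ofList) then (1:Int) else 0)).sum := by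
    intro rows
    induction rows with
    | nil => simp
    | cons r rest ih =>
      intro acc
      simp only [List.foldl_cons, List.map_cons, List.sum_cons, ih]
      rw [pvIndexFrom_isSome]
      simp [PySem.Dict.get?_empty]
      ring
  simp only [hB pvRows 0, zero_add]
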